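-- pv_equiv track=rewrite | github.com/SirPoko/Lexer-Poko | lexerPoko.py | mop
-- ===== SOURCE A (Python) =====
-- ESTADO_FINAL = "ESTADO FINAL"
--
-- ESTADO_NO_FINAL = "NO ACEPTADO"
--
-- ESTADO_TRAMPA = "EN ESTADO TRAMPA"
--
-- def mop(cadena):
--     estado = 0
--     estados_aceptados = [1]
--     delta = {0:{'+':1, '-':1, '*':1, '/':1}, 1:{}}
--     for caracter in cadena:
--         if caracter in delta[estado].keys():
--             estado = delta[estado][caracter]
--         else:
--             estado = -1
--             break
--     if estado == -1:
--         return ESTADO_TRAMPA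
--     if estado in estados_aceptados:
--         return ESTADO_FINAL
--     else:
--         return ESTADO_NO_FINAL
-- ===== SOURCE B (Python) =====
-- ESTADO_FINAL = "ESTADO FINAL"
-- ESTADO_NO_FINAL = "NO ACEPTADO"
-- ESTADO_TRAMPA = "EN ESTADO TRAMPA"
--
-- def mop(cadena):
--     caracteres = list(cadena)
--     if len(caracteres) == 1 and caracteres[0] in {'+', '-', '*', '/'}:
--         return ESTADO_FINAL
--     elif len(caracteres) == 0:
--         return ESTADO_NO_FINAL
--     else:
--         return ESTADO_TRAMPA
-- ===== Notes on version B (the rewrite author's own statement) =====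
-- stated objective: simpler
-- what changed: Replaced the DFA transition loop over a delta table with a direct closed-form classification by length and a single membership test on the sole character.
import Mathlib
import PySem

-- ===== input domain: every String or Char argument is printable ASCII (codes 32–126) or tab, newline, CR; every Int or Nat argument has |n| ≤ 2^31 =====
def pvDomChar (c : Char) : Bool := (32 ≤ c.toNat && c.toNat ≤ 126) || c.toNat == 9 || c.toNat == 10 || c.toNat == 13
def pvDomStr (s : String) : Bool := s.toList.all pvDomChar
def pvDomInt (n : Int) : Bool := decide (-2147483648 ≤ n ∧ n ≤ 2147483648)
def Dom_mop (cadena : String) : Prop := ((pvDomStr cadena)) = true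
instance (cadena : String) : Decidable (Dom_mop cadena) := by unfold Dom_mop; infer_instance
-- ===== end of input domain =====

-- B replaces A's DFA loop with a closed-form length/membership classification (objective: simpler).


-- ===== PORT A =====
-- the DFA loop: delta = {0:{'+':1,'-':1,'*':1,'/':1}, 1:{}}; on a missing key set estado := -1 and break
def mopLoop : List Char → Int → Int
  | [], estado => estado
  | c :: rest, estado =>
      if estado = 0 ∧ (c = '+' ∨ c = '-' ∨ c = '*' ∨ c = '/') then
        mopLoop rest 1
      else
        -1

def mop (cadena : String) : String :=
  let estado := mopLoop cadena.toList 0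
  if estado = -1 then "EN ESTADO TRAMPA"
  else if estado = 1 then "ESTADO FINAL"
  else "NO ACEPTADO"

-- ===== PORT B =====
def mop_alt (cadena : String) : String :=
  let caracteres := cadena.toList
  if caracteres.length = 1 ∧ (caracteres.headD ' ' = '+' ∨ caracteres.headD ' ' = '-' ∨ caracteres.headD ' ' = '*' ∨ caracteres.headD ' ' = '/') then
    "ESTADO FINAL"
  else if caracteres.length = 0 then
    "NO ACEPTADO"
  else
    "EN ESTADO TRAMPA"

-- ===== PRECONDITION & SPEC =====
def Spec_mop (cadena : String) (out : String) : Prop := out = mop_alt cadena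
instance (cadena : String) (out : String) : Decidable (Spec_mop cadena out) := by unfold Spec_mop; infer_instance

-- ===== CLAIM (what is proved, stated in full; the proofs are below) =====
def Claim_equal_mop : Prop := ∀ (cadena : String), Dom_mop cadena → Spec_mop cadena (mop cadena)

-- ===== LEMMAS AND PROOFS =====
theorem mop_eq_alt (cadena : String) : mop cadena = mop_alt cadena := by
  unfold mop mop_alt
  match h : cadena.toList with
  | [] => simp [mopLoop]
  | [c] =>
      by_cases hc : c = '+' ∨ c = '-' ∨ c = '*' ∨ c = '/' <;>
        simp [mopLoop, hc]
  | c :: d :: rest =>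
      by_cases hc : c = '+' ∨ c = '-' ∨ c = '*' ∨ c = '/' <;>
        simp [mopLoop, hc]

-- ===== VERDICT (by name: the statement is the Claim_ definition above) =====
theorem mop_spec : Claim_equal_mop := by
  intro cadena _
  exact mop_eq_alt cadena
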